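-- pv_equiv track=rewrite | github.com/sasukeuwu/bio-informatics | dna_game_package.py | give_hint
-- ===== SOURCE A (Python) =====
-- def give_hint(sequence, guess):
--     if guess not in sequence:
--         return "Not found"
--
--     index = sequence.find(guess)
--     hint = ["_" for _ in sequence]
--     for i in range(index, index + len(guess)):
--         hint[i] = sequence[i]
--     return "".join(hint)
-- ===== SOURCE B (Python) =====
-- def give_hint(sequence, guess):
--     index = sequence.find(guess)
--     if index == -1:
--         return "Not found"
--     end = index + len(guess)
--     return "_" * index + sequence[index:end] + "_" * (len(sequence) - end)
-- ===== Notes on version B (the rewrite author's own statement) =====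
-- stated objective: simpler
-- what changed: Replaces the mutable per-character list with its index loop and join by one find plus closed-form string slicing and '_'-padding concatenation.
import Mathlib
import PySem

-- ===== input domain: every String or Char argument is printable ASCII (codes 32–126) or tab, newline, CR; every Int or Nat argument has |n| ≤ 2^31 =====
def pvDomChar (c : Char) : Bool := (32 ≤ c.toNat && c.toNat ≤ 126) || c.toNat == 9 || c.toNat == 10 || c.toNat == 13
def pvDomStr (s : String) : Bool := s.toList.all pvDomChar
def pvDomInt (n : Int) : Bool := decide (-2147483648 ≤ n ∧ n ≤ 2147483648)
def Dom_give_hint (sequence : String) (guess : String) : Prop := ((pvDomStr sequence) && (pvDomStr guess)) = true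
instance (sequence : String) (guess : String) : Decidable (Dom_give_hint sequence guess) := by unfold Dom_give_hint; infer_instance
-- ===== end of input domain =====

-- B replaces A's mutable underscore list, index loop and join with one find plus
-- closed-form slice-and-pad concatenation (objective: simpler). Return values only; neither mutates.

-- ===== PORT A =====
-- hint is a list of one-character strings in Python; modelled as List Char (exact here,
-- since every element is a single character); "".join(hint) is then String.ofList.
-- hint[i] = sequence[i]: i is always in range here, so pyGet?/getD '_' is exact.
def give_hint (sequence : String) (guess : String) : String :=
  if ¬ (PySem.Str.isIn guess sequence = true) then "Not found"
  else
    let index := PySem.Str.find sequence guess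
    let hint := sequence.toList.map (fun _ => '_')
    let hint := (PySem.List.pyRange index (index + (guess.toList.length : Int)) 1).foldl
      (fun h i => h.set i.toNat ((PySem.List.pyGet? sequence.toList i).getD '_')) hint
    String.ofList hint

-- ===== PORT B =====
def give_hint_alt (sequence : String) (guess : String) : String :=
  let index := PySem.Str.find sequence guess
  if index = -1 then "Not found"
  else
    let e := index + (guess.toList.length : Int)
    String.ofList (PySem.List.pyRepeat ['_'] index
      ++ PySem.List.slice sequence.toList (some index) (some e)
      ++ PySem.List.pyRepeat ['_'] ((sequence.toList.length : Int) - e))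

-- ===== PRECONDITION & SPEC =====
def Spec_give_hint (sequence : String) (guess : String) (out : String) : Prop := out = give_hint_alt sequence guess
instance (sequence : String) (guess : String) (out : String) : Decidable (Spec_give_hint sequence guess out) := by unfold Spec_give_hint; infer_instance

-- ===== CLAIM (what is proved, stated in full; the proofs are below) =====
def Claim_equal_give_hint : Prop := ∀ (sequence : String) (guess : String), Dom_give_hint sequence guess → Spec_give_hint sequence guess (give_hint sequence guess)

-- ===== LEMMAS AND PROOFS =====

-- The index loop writing s[i] into position i over [j, j+g) rewrites the middle of h.
theorem pv_fold_set (s : List Char) (g : Nat) :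
    ∀ (j : Nat) (h : List Char), h.length = s.length → j + g ≤ s.length →
    (PySem.List.pyRange (j : Int) ((j : Int) + (g : Int)) 1).foldl
        (fun h i => h.set i.toNat ((PySem.List.pyGet? s i).getD '_')) h
      = h.take j ++ (s.drop j).take g ++ h.drop (j + g) := by
  induction g with
  | zero =>
    intro j h hl hle
    simp only [Int.add_zero, Nat.cast_zero, PySem.List.pyRange_one_eq_nil (le_refl ((j : Int))), List.foldl_nil, Nat.add_zero, List.take_zero]
    simp
  | succ g ih =>
    intro j h hl hle
    have hjlt : j < s.length := by omega
    have hcons : PySem.List.pyRange (j : Int) ((j : Int) + ((g : Int) + 1)) 1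
        = (j : Int) :: PySem.List.pyRange ((j : Int) + 1) ((j : Int) + ((g : Int) + 1)) 1 :=
      PySem.List.pyRange_one_cons (by omega)
    have hget : (PySem.List.pyGet? s (j : Int)).getD '_' = s.getD j '_' := by
      rw [PySem.List.pyGet?_natCast]
      simp [List.getElem?_eq_getElem hjlt, List.getD]
    push_cast
    rw [hcons, List.foldl_cons]
    have h2 : ((j : Int) + 1) = ((j + 1 : Nat) : Int) := by push_cast; ring
    have h3 : ((j : Int) + ((g : Int) + 1)) = (((j + 1) : Nat) : Int) + (g : Nat) := by push_cast; ring
    rw [hget, Int.toNat_natCast, h2, h3,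
        ih (j + 1) (h.set j (s.getD j '_')) (by simp [hl]) (by omega)]
    have hjh : j < h.length := by omega
    have htake : (h.set j (s.getD j '_')).take (j + 1) = h.take j ++ [s.getD j '_'] := by
      rw [List.set_eq_take_append_cons_drop, if_pos hjh]
      simp [List.take_append, List.length_take, Nat.min_eq_left (le_of_lt hjh), List.take_succ_cons]
    have hdrop : (h.set j (s.getD j '_')).drop (j + 1 + g) = h.drop (j + (g + 1)) := by
      rw [List.drop_set_of_lt (by omega)]
      congr 1; omega
    rw [htake, hdrop]
    have hmid : (s.drop j).take (g + 1) = s.getD j '_' :: (s.drop (j + 1)).take g := by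
      have : s.drop j = s.getD j '_' :: s.drop (j + 1) := by
        rw [List.drop_eq_getElem_cons hjlt]
        simp [List.getD, List.getElem?_eq_getElem hjlt]
      rw [this, List.take_succ_cons]
    rw [hmid]
    simp

-- ===== VERDICT (by name: the statement is the Claim_ definition above) =====
theorem give_hint_spec : Claim_equal_give_hint := by
  intro sequence guess _
  unfold Spec_give_hint give_hint give_hint_alt
  by_cases hin : PySem.Str.isIn guess sequence = true
  · have hinf : guess.toList <:+: sequence.toList := by
      rwa [PySem.Str.isIn_iff_infix] at hin
    have hfind : 0 ≤ PySem.Chars.find sequence.toList guess.toList := by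
      rw [PySem.Chars.find_nonneg_iff]; exact hinf
    have hne : ¬ PySem.Str.find sequence guess = -1 := by
      show ¬ PySem.Chars.find sequence.toList guess.toList = -1; omega
    rw [if_neg (not_not_intro hin), if_neg hne]
    have hF : PySem.Str.find sequence guess = PySem.Chars.find sequence.toList guess.toList := rfl
    rw [hF]
    set idx := PySem.Chars.find sequence.toList guess.toList with hidx
    set j := idx.toNat with hj
    have hjidx : (j : Int) = idx := Int.toNat_of_nonneg hfind
    have hspec := PySem.Chars.find_spec (s := sequence.toList) (sub := guess.toList) hfind
    have hpre : guess.toList <+: sequence.toList.drop j := hspec.1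
    have hjle : idx ≤ (sequence.toList.length : Int) := PySem.Chars.find_le_length ..
    have hbound : j + guess.toList.length ≤ sequence.toList.length := by
      have h4 := List.IsPrefix.length_le hpre
      rw [List.length_drop] at h4; omega
    have hmap : sequence.toList.map (fun _ => '_') = List.replicate sequence.toList.length '_' := by
      simp
    have hfold := pv_fold_set sequence.toList guess.toList.length j
      (sequence.toList.map (fun _ => '_')) (by simp) hbound
    rw [← hjidx]
    have h1 : (List.replicate sequence.toList.length '_').take j
        = PySem.List.pyRepeat ['_'] ((j : Nat) : Int) := by
      rw [PySem.List.pyRepeat_singleton, Int.toNat_natCast, List.take_replicate,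
        Nat.min_eq_left (by omega)]
    have h2 : (sequence.toList.drop j).take guess.toList.length
        = PySem.List.slice sequence.toList (some ((j : Nat) : Int))
            (some (((j : Nat) : Int) + (guess.toList.length : Int))) := by
      rw [PySem.List.slice_natCast_add]
    have h3 : (List.replicate sequence.toList.length '_').drop (j + guess.toList.length)
        = PySem.List.pyRepeat ['_']
            ((sequence.toList.length : Int) - (((j : Nat) : Int) + (guess.toList.length : Int))) := by
      rw [PySem.List.pyRepeat_singleton, List.drop_replicate]
      congr 1; omega
    rw [hmap] at hfold
    simp only [hmap]
    rw [hfold, h1, h2, h3]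
  · have hninf : ¬ guess.toList <:+: sequence.toList := by
      rw [← PySem.Str.isIn_iff_infix]; exact hin
    have hneg : PySem.Str.find sequence guess = -1 := by
      rw [PySem.Str.find_eq_neg_one_iff]; exact hninf
    rw [if_pos hin, if_pos hneg]
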